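-- pv_equiv track=rewrite | github.com/sumkincpp/CodeTest | comptetive-programming/adventofcode2020/01-12-max-product.py | find_max_product_simple
-- ===== SOURCE A (Python) =====
-- ADVENT_2020 = 2020
--
-- def find_max_product_simple(iterator, numbers_count=2, desired_num=ADVENT_2020):
--     """
--     Finds max product of TWO nums that are also in sum= :desired_num
--     """
--     lookup = {}
--     max_so_far = -1
--
--     for line in iterator:
--         num1 = int(line)
--         num2 = desired_num - num1
--
--         if num1 in lookup:
--             new_product = num1 * num2
--
--             if max_so_far < new_product:
--                 max_so_far = new_product
--
--         lookup.setdefault(num2, 1)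
--
--     return max_so_far
-- ===== SOURCE B (Python) =====
-- ADVENT_2020 = 2020
--
-- def find_max_product_simple(iterator, numbers_count=2, desired_num=ADVENT_2020):
--     """
--     Finds max product of TWO nums that are also in sum= :desired_num
--     (brute-force pair scan over the materialized list of numbers)
--     """
--     nums = [int(line) for line in iterator]
--     best = -1
--     for i, x in enumerate(nums):
--         for y in nums[i + 1:]:
--             if x + y == desired_num:
--                 p = x * y
--                 if p > best:
--                     best = p
--     return best
-- ===== Notes on version B (the rewrite author's own statement) =====
-- stated objective: simpler
-- what changed: Replaced the single-pass complement-lookup dictionary with materializing the numbers once and a plain nested scan over all pairs i<j, keeping the maximum qualifying product.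
import Mathlib
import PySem

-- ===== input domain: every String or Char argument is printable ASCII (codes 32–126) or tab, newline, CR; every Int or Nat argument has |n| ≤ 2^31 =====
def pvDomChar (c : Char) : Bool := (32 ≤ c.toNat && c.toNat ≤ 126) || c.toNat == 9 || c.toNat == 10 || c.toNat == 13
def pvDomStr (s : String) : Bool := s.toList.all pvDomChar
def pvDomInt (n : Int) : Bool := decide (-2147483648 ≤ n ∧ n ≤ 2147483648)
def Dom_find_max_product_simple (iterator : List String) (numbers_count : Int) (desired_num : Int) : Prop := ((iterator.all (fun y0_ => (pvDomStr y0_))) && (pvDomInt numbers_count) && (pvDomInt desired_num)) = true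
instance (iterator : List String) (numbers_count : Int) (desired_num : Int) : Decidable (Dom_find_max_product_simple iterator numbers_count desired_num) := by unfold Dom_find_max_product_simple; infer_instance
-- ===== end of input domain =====

-- B replaces A's one-pass complement-lookup dictionary by a plain nested scan over all
-- pairs i < j of the materialized number list (objective: simpler; not faster).

-- ===== PORT A =====
def find_max_product_simple (iterator : List String) (numbers_count : Int) (desired_num : Int) : Int :=
  (iterator.foldl
    (fun (st : PySem.Dict Int Int × Int) line =>
      let num1 := (PySem.Int.ofStr? line).getD 0   -- int(line); Pre_ guarantees it parses
      let num2 := desired_num - num1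
      let max_so_far :=
        if st.1.contains num1 then
          (if st.2 < num1 * num2 then num1 * num2 else st.2)
        else st.2
      (st.1.setdefault num2 1, max_so_far))
    (PySem.Dict.empty, -1)).2

-- ===== PORT B =====
-- the nested loop of Source B: outer loop peels x, inner fold scans the rest (nums[i+1:])
def pvScanB (d : Int) : Int → List Int → Int
  | best, [] => best
  | best, x :: rest =>
      pvScanB d
        (rest.foldl (fun b y => if x + y == d then (if b < x * y then x * y else b) else b) best)
        rest

def find_max_product_simple_alt (iterator : List String) (numbers_count : Int) (desired_num : Int) : Int :=
  let nums := iterator.map (fun line => (PySem.Int.ofStr? line).getD 0)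
  pvScanB desired_num (-1) nums

-- ===== PRECONDITION & SPEC =====
-- Pre_ excludes exactly the inputs where some line is not a valid int literal: there
-- Python's int(line) raises ValueError (in A and in B alike).
def Pre_find_max_product_simple (iterator : List String) (numbers_count : Int) (desired_num : Int) : Prop :=
  ∀ s ∈ iterator, (PySem.Int.ofStr? s).isSome = true
instance (iterator : List String) (numbers_count : Int) (desired_num : Int) : Decidable (Pre_find_max_product_simple iterator numbers_count desired_num) := by unfold Pre_find_max_product_simple; infer_instance

def pvWitness_find_max_product_simple : List String × Int × Int := (["1010", " 1010 ", "3"], 2, 2020)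

def Spec_find_max_product_simple (iterator : List String) (numbers_count : Int) (desired_num : Int) (out : Int) : Prop := out = find_max_product_simple_alt iterator numbers_count desired_num
instance (iterator : List String) (numbers_count : Int) (desired_num : Int) (out : Int) : Decidable (Spec_find_max_product_simple iterator numbers_count desired_num out) := by unfold Spec_find_max_product_simple; infer_instance

-- ===== CLAIM (what is proved, stated in full; the proofs are below) =====
def Claim_equal_find_max_product_simple : Prop := ∀ (iterator : List String) (numbers_count : Int) (desired_num : Int), Dom_find_max_product_simple iterator numbers_count desired_num → Pre_find_max_product_simple iterator numbers_count desired_num → Spec_find_max_product_simple iterator numbers_count desired_num (find_max_product_simple iterator numbers_count desired_num)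

-- ===== LEMMAS AND PROOFS =====

-- `if b < v then v else b` is `max b v`
theorem pv_upd_eq_max (b v : Int) : (if b < v then v else b) = max b v := by
  rw [max_def]; split_ifs <;> omega

-- foldl max basics
theorem pv_fm_init : ∀ (l : List Int) (m : Int), m ≤ l.foldl max m := by
  intro l
  induction l with
  | nil => intro m; simp
  | cons a l ih => intro m; exact le_trans (le_max_left m a) (ih (max m a))

theorem pv_fm_mem : ∀ (l : List Int) (m x : Int), x ∈ l → x ≤ l.foldl max m := by
  intro l
  induction l with
  | nil => intro m x h; cases h
  | cons a l ih =>
      intro m x h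
      rcases List.mem_cons.1 h with h | h
      · subst h; exact le_trans (le_max_right m x) (pv_fm_init l (max m x))
      · exact ih (max m a) x h

theorem pv_fm_cases : ∀ (l : List Int) (m : Int), l.foldl max m = m ∨ l.foldl max m ∈ l := by
  intro l
  induction l with
  | nil => intro m; left; rfl
  | cons a l ih =>
      intro m
      rcases ih (max m a) with h | h
      · rcases max_choice m a with hm | hm
        · left; rw [List.foldl_cons, h, hm]
        · right; rw [List.foldl_cons, h, hm]; exact List.mem_cons_self
      · right; exact List.mem_cons_of_mem a h

theorem pv_fm_eq (l₁ l₂ : List Int) (m : Int)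
    (h₁ : ∀ x ∈ l₁, x ∈ l₂) (h₂ : ∀ x ∈ l₂, x ∈ l₁) :
    l₁.foldl max m = l₂.foldl max m := by
  apply le_antisymm
  · rcases pv_fm_cases l₁ m with h | h
    · rw [h]; exact pv_fm_init l₂ m
    · exact pv_fm_mem l₂ m _ (h₁ _ h)
  · rcases pv_fm_cases l₂ m with h | h
    · rw [h]; exact pv_fm_init l₁ m
    · exact pv_fm_mem l₁ m _ (h₂ _ h)

-- the qualifying products of B's pair scan
def pvProdsB (d : Int) : List Int → List Int
  | [] => []
  | x :: r => ((r.filter (fun y => x + y == d)).map (fun y => x * y)) ++ pvProdsB d r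

-- the qualifying products of A's loop, with p = the already-processed numbers
def pvProdsA (d : Int) : List Int → List Int → List Int
  | _, [] => []
  | p, x :: r => (if d - x ∈ p then [x * (d - x)] else []) ++ pvProdsA d (p ++ [x]) r

theorem pv_inner_eq (d x : Int) : ∀ (r : List Int) (m : Int),
    r.foldl (fun b y => if x + y == d then (if b < x * y then x * y else b) else b) m
      = ((r.filter (fun y => x + y == d)).map (fun y => x * y)).foldl max m := by
  intro r
  induction r with
  | nil => intro m; rfl
  | cons y r ih =>
      intro m
      rw [List.foldl_cons, List.filter_cons]
      by_cases h : (x + y == d) = true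
      · rw [if_pos h, if_pos h, pv_upd_eq_max, List.map_cons, List.foldl_cons]
        exact ih (max m (x * y))
      · rw [if_neg h, if_neg h]
        exact ih m

theorem pv_scanB_eq (d : Int) : ∀ (l : List Int) (m : Int),
    pvScanB d m l = (pvProdsB d l).foldl max m := by
  intro l
  induction l with
  | nil => intro m; rfl
  | cons x r ih =>
      intro m
      show pvScanB d (r.foldl _ m) r = _
      rw [ih, pv_inner_eq, pvProdsB, List.foldl_append]

-- A's loop body as a named step function
def pvStepA (d : Int) (st : PySem.Dict Int Int × Int) (x : Int) : PySem.Dict Int Int × Int :=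
  (st.1.setdefault (d - x) 1,
   if st.1.contains x then (if st.2 < x * (d - x) then x * (d - x) else st.2) else st.2)

theorem pv_portA_eq (iterator : List String) (nc d : Int) :
    find_max_product_simple iterator nc d
      = ((iterator.map (fun s => (PySem.Int.ofStr? s).getD 0)).foldl (pvStepA d)
          (PySem.Dict.empty, -1)).2 := by
  rw [List.foldl_map]; rfl

theorem pv_loopA_eq (d : Int) : ∀ (l p : List Int) (lk : PySem.Dict Int Int) (m : Int),
    (∀ k : Int, lk.contains k = decide (d - k ∈ p)) →
    (l.foldl (pvStepA d) (lk, m)).2 = (pvProdsA d p l).foldl max m := by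
  intro l
  induction l with
  | nil => intro p lk m _; rfl
  | cons x r ih =>
      intro p lk m hinv
      have hx : lk.contains x = decide (d - x ∈ p) := hinv x
      have hinv' : ∀ k : Int, (lk.setdefault (d - x) 1).contains k = decide (d - k ∈ p ++ [x]) := by
        intro k
        rw [PySem.Dict.contains_setdefault, hinv k]
        have h1 : (k == d - x) = decide (d - k = x) := by
          by_cases h : k = d - x
          · subst h
            have h3 : d - (d - x) = x := by omega
            simp [h3]
          · have h2 : ¬ (d - k = x) := by omega
            simp [h, h2]
        rw [h1]
        simp [List.mem_append, Or.comm]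
      rw [List.foldl_cons, pvProdsA, List.foldl_append]
      have hstep : pvStepA d (lk, m) x
          = (lk.setdefault (d - x) 1,
             if lk.contains x then (if m < x * (d - x) then x * (d - x) else m) else m) := rfl
      rw [hstep, ih (p ++ [x]) _ _ hinv']
      congr 1
      rw [hx]
      by_cases h : d - x ∈ p
      · simp [h, pv_upd_eq_max]
      · simp [h]

theorem pv_memBmix (d : Int) : ∀ (l p : List Int) (t x : Int),
    t ∈ p → x ∈ l → t + x = d → x * (d - x) ∈ pvProdsA d p l := by
  intro l
  induction l with
  | nil => intro p t x _ hx; cases hx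
  | cons y r ih =>
      intro p t x ht hx hs
      rcases List.mem_cons.1 hx with h | h
      · subst h
        have hmem : d - x ∈ p := by
          have : d - x = t := by omega
          rw [this]; exact ht
        rw [pvProdsA]
        simp [hmem]
      · rw [pvProdsA]
        exact List.mem_append_right _ (ih (p ++ [y]) t x (List.mem_append_left _ ht) h hs)

theorem pv_memB (d : Int) : ∀ (l p : List Int) (v : Int),
    v ∈ pvProdsB d l → v ∈ pvProdsA d p l := by
  intro l
  induction l with
  | nil => intro p v h; cases h
  | cons x r ih =>
      intro p v h
      rw [pvProdsB] at h
      rw [pvProdsA]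
      rcases List.mem_append.1 h with h | h
      · rcases List.mem_map.1 h with ⟨y, hy, rfl⟩
        have hf := List.mem_filter.1 hy
        have hs : x + y = d := by simpa using hf.2
        have hmem := pv_memBmix d r (p ++ [x]) x y (by simp) hf.1 (by omega)
        have hval : y * (d - y) = x * y := by
          have : d - y = x := by omega
          rw [this]; ring
        rw [hval] at hmem
        exact List.mem_append_right _ hmem
      · exact List.mem_append_right _ (ih (p ++ [x]) v h)

theorem pv_memA (d : Int) : ∀ (l p : List Int) (v : Int),
    v ∈ pvProdsA d p l →
    (∃ t ∈ p, ∃ x ∈ l, t + x = d ∧ v = x * (d - x)) ∨ v ∈ pvProdsB d l := by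
  intro l
  induction l with
  | nil => intro p v h; cases h
  | cons x r ih =>
      intro p v h
      rw [pvProdsA] at h
      rcases List.mem_append.1 h with h | h
      · by_cases hm : d - x ∈ p
        · rw [if_pos hm] at h
          rcases List.mem_singleton.1 h with rfl
          exact Or.inl ⟨d - x, hm, x, List.mem_cons_self, by omega, rfl⟩
        · rw [if_neg hm] at h; cases h
      · rcases ih (p ++ [x]) v h with ⟨t, ht, y, hy, hs, rfl⟩ | hB
        · rcases List.mem_append.1 ht with ht | ht
          · exact Or.inl ⟨t, ht, y, List.mem_cons_of_mem x hy, hs, rfl⟩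
          · have htx : t = x := List.mem_singleton.1 ht
            right
            rw [pvProdsB]
            apply List.mem_append_left
            apply List.mem_map.2
            refine ⟨y, List.mem_filter.2 ⟨hy, ?_⟩, ?_⟩
            · have h4 : x + y = d := by omega
              simpa using h4
            · have h3 : d - y = x := by omega
              rw [h3]; ring
        · right; rw [pvProdsB]; exact List.mem_append_right _ hB

-- ===== VERDICT (by name: the statement is the Claim_ definition above) =====
theorem find_max_product_simple_spec : Claim_equal_find_max_product_simple := by
  intro iterator nc d _ _
  unfold Spec_find_max_product_simple find_max_product_simple_alt
  set nums := iterator.map (fun s => (PySem.Int.ofStr? s).getD 0) with hnums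
  rw [pv_portA_eq, ← hnums,
    pv_loopA_eq d nums [] PySem.Dict.empty (-1) (by intro k; simp),
    pv_scanB_eq]
  apply pv_fm_eq
  · intro v hv
    rcases pv_memA d nums [] v hv with ⟨t, ht, _⟩ | h
    · cases ht
    · exact h
  · intro v hv
    exact pv_memB d nums [] v hv
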